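-- pv_equiv track=rewrite | github.com/marjan-sz/CodeSignal_Solutions | isInfiniteProcess.py | isInfiniteProcess
-- ===== SOURCE A (Python) =====
-- def isInfiniteProcess(a, b):
--     """
--     Pseudocode:
--     in: two integers
--     out: boolean (If the given pseudocode will never stop, return True otherwise return False)
--     Check if the following pseudocode results in infinite loop
--     While a is not equal to b do
--     increase a by 1
--     decrease b by 1
--     """
--     while a != b:
--         a += 1
--         b -= 1
--         if a > b:
--             return True
--             break
--     return False
-- ===== SOURCE B (Python) =====
-- def isInfiniteProcess(a, b):
--     # Closed form: the process loops forever iff a != b and either a > b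
--     # (the gap only grows) or the gap b - a is odd (a and b step past each other).
--     return a != b and (a > b or (b - a) % 2 == 1)
-- ===== Notes on version B (the rewrite author's own statement) =====
-- stated objective: simpler
-- what changed: Replaced the step-by-step simulation loop with a closed-form parity/ordering test: infinite iff a != b and (a > b or (b - a) is odd).
import Mathlib
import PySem

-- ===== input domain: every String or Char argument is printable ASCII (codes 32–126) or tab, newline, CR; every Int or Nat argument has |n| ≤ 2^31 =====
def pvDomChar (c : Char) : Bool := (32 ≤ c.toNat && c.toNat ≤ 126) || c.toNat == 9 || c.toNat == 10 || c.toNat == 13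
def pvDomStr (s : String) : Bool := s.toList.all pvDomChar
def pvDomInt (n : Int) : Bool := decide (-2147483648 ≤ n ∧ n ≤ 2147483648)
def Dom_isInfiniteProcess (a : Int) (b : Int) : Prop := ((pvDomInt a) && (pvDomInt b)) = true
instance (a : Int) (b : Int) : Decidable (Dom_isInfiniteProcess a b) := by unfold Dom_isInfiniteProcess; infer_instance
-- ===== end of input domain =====

-- B replaces A's step-by-step simulation loop with a closed-form parity/ordering test (simpler).
-- ===== PORT A =====
-- literal port of A's while-loop: while a != b: a += 1; b -= 1; if a > b: return True
def isInfiniteProcess (a : Int) (b : Int) : Bool :=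
  if a = b then false
  else
    let a' := a + 1
    let b' := b - 1
    if a' > b' then true
    else isInfiniteProcess a' b'
termination_by (b - a).toNat
decreasing_by
  simp only [not_lt] at *
  omega

-- ===== PORT B =====
def isInfiniteProcess_alt (a : Int) (b : Int) : Bool :=
  a != b && (a > b || PySem.Int.mod (b - a) 2 == 1)

-- ===== PRECONDITION & SPEC =====
def Spec_isInfiniteProcess (a : Int) (b : Int) (out : Bool) : Prop := out = isInfiniteProcess_alt a b
instance (a : Int) (b : Int) (out : Bool) : Decidable (Spec_isInfiniteProcess a b out) := by unfold Spec_isInfiniteProcess; infer_instance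

-- ===== CLAIM (what is proved, stated in full; the proofs are below) =====
def Claim_equal_isInfiniteProcess : Prop := ∀ (a : Int) (b : Int), Dom_isInfiniteProcess a b → Spec_isInfiniteProcess a b (isInfiniteProcess a b)

-- ===== LEMMAS AND PROOFS =====

-- A's loop computed against the closed form, by well-founded induction on the gap b - a.
theorem loop_eq_closed (a b : Int) : isInfiniteProcess a b = isInfiniteProcess_alt a b := by
  rw [isInfiniteProcess]
  by_cases h1 : a = b
  · simp [h1, isInfiniteProcess_alt]
  · simp only [h1, if_false]
    by_cases h2 : a + 1 > b - 1
    · simp only [h2, if_true]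
      simp only [isInfiniteProcess_alt, PySem.Int.mod_eq_emod_of_pos (by norm_num : (0:Int) < 2), bne, BEq.beq]
      have hor : a > b ∨ (b - a) % 2 = 1 := by omega
      cases hor with
      | inl h => simp [h1, h]
      | inr h => simp [h1, h]
    · simp only [h2, if_false]
      have ih := loop_eq_closed (a + 1) (b - 1)
      rw [ih]
      simp only [isInfiniteProcess_alt, PySem.Int.mod_eq_emod_of_pos (by norm_num : (0:Int) < 2), bne, BEq.beq]
      simp only [gt_iff_lt, not_lt] at h2
      have h3 : ¬ (a + 1 > b - 1) := by omega
      by_cases he : a + 1 = b - 1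
      · have h0 : (b - a) % 2 = 0 := by omega
        simp [he, h1, h0]
        omega
      · have hm : (b - 1 - (a + 1)) % 2 = (b - a) % 2 := by omega
        have hA : ¬ (b ≤ a + 1) := by omega
        have hB : ¬ (b < a) := by omega
        simp [he, h1, hm, hA, hB]
termination_by (b - a).toNat
decreasing_by
  simp only [gt_iff_lt, not_lt] at *
  omega

-- ===== VERDICT (by name: the statement is the Claim_ definition above) =====
theorem isInfiniteProcess_spec : Claim_equal_isInfiniteProcess := by
  intro a b _
  unfold Spec_isInfiniteProcess
  exact loop_eq_closed a b
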